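-- pv_equiv track=rewrite | github.com/saeedghsh/playground | under_dev/random_playlist_v2.py | find_longest_gap
-- ===== SOURCE A (Python) =====
-- def find_longest_gap(array):
--     last_index = {}
--     max_gap = 0
--
--     for index, sample in enumerate(array):
--         if sample in last_index:
--             gap = index - last_index[sample]
--             if gap > max_gap:
--                 max_gap = gap
--         last_index[sample] = index
--
--     return max_gap
-- ===== SOURCE B (Python) =====
-- def find_longest_gap(array):
--     positions = {}
--     for index, sample in enumerate(array):
--         positions.setdefault(sample, []).append(index)
--     best = 0
--     for indices in positions.values():
--         for prev, cur in zip(indices, indices[1:]):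
--             if cur - prev > best:
--                 best = cur - prev
--     return best
-- ===== Notes on version B (the rewrite author's own statement) =====
-- stated objective: alternative
-- what changed: B splits the work into two phases: one pass grouping each value's full list of occurrence indices in a dict, then a scan of each group's adjacent index differences, instead of A's single pass that tracks only a last-seen index per value and updates the max inline.
import Mathlib
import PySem

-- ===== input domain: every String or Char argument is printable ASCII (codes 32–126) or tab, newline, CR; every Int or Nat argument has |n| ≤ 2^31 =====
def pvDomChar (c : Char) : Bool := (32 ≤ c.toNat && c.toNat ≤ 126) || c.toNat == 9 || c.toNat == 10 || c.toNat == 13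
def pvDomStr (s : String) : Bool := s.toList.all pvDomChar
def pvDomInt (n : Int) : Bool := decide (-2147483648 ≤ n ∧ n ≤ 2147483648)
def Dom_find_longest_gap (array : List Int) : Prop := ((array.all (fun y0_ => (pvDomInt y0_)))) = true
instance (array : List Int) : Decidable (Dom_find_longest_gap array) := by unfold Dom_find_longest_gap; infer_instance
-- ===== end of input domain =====

-- B replaces A's single-pass last-index tracking by a two-phase scan (group all occurrence
-- indices per value in a dict, then take the max adjacent difference within each group);
-- an alternative decomposition of the same O(n) task, proved to return the same value.

-- ===== PORT A =====
def find_longest_gap (array : List Int) : Int :=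
  ((PySem.List.enumerate array 0).foldl
    (fun (st : PySem.Dict Int Int × Int) (p : Int × Int) =>
      (st.1.insert p.2 p.1,
        if st.1.contains p.2 then
          (if p.1 - st.1.getD p.2 0 > st.2 then p.1 - st.1.getD p.2 0 else st.2)
        else st.2))
    (PySem.Dict.empty, 0)).2

-- ===== PORT B =====
def find_longest_gap_alt (array : List Int) : Int :=
  let positions :=
    (PySem.List.enumerate array 0).foldl
      (fun (d : PySem.Dict Int (List Int)) (p : Int × Int) =>
        d.modify p.2 [] (fun l => l ++ [p.1]))
      PySem.Dict.empty
  positions.values.foldl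
    (fun best indices =>
      (indices.zip indices.tail).foldl
        (fun best q => if q.2 - q.1 > best then q.2 - q.1 else best)
        best)
    0

-- ===== PRECONDITION & SPEC =====
def Spec_find_longest_gap (array : List Int) (out : Int) : Prop := out = find_longest_gap_alt array
instance (array : List Int) (out : Int) : Decidable (Spec_find_longest_gap array out) := by unfold Spec_find_longest_gap; infer_instance

-- ===== CLAIM (what is proved, stated in full; the proofs are below) =====
def Claim_equal_find_longest_gap : Prop := ∀ (array : List Int), Dom_find_longest_gap array → Spec_find_longest_gap array (find_longest_gap array)

-- ===== LEMMAS AND PROOFS =====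

-- Proof-side names for the two folds (definitionally the bodies of the ports).
def pvStepA (st : PySem.Dict Int Int × Int) (p : Int × Int) : PySem.Dict Int Int × Int :=
  (st.1.insert p.2 p.1,
    if st.1.contains p.2 then
      (if p.1 - st.1.getD p.2 0 > st.2 then p.1 - st.1.getD p.2 0 else st.2)
    else st.2)

def pvGa (xs : List Int) : PySem.Dict Int Int × Int :=
  (PySem.List.enumerate xs 0).foldl pvStepA (PySem.Dict.empty, 0)

def pvGd (xs : List Int) : PySem.Dict Int (List Int) :=
  (PySem.List.enumerate xs 0).foldl
    (fun d p => d.modify p.2 [] (fun l => l ++ [p.1])) PySem.Dict.empty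

def pvStep (b : Int) (q : Int × Int) : Int := if q.2 - q.1 > b then q.2 - q.1 else b

def pvAdjBest (b : Int) (l : List Int) : Int := (l.zip l.tail).foldl pvStep b

def pvTot (xs : List Int) : Int := (pvGd xs).values.foldl pvAdjBest 0

-- indices at which v occurs in xs, ascending
def pvOcc (xs : List Int) (v : Int) : List Int :=
  ((PySem.List.enumerate xs 0).filter (fun p => p.2 == v)).map (fun p => p.1)

lemma pv_ga_eq (xs : List Int) : find_longest_gap xs = (pvGa xs).2 := rfl

lemma pv_alt_eq (xs : List Int) : find_longest_gap_alt xs = pvTot xs := rfl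

lemma pv_if_gt_eq_max (b g : Int) : (if g > b then g else b) = b ⊔ g := by
  split_ifs <;> omega

lemma pv_step_eq_max (b : Int) (q : Int × Int) : pvStep b q = b ⊔ (q.2 - q.1) := by
  unfold pvStep; exact pv_if_gt_eq_max b (q.2 - q.1)

lemma pv_foldl_step_max (ps : List (Int × Int)) (b g : Int) :
    ps.foldl pvStep (b ⊔ g) = ps.foldl pvStep b ⊔ g := by
  induction ps generalizing b with
  | nil => rfl
  | cons q ps ih =>
    simp only [List.foldl_cons]
    rw [show pvStep (b ⊔ g) q = pvStep b q ⊔ g by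
          simp [pv_step_eq_max, max_right_comm]]
    exact ih _

lemma pv_adjBest_max (b g : Int) (l : List Int) :
    pvAdjBest (b ⊔ g) l = pvAdjBest b l ⊔ g := pv_foldl_step_max _ b g

lemma pv_zip_tail_append (l : List Int) (a n : Int) (h : l.getLast? = some a) :
    (l ++ [n]).zip ((l ++ [n]).tail) = l.zip l.tail ++ [(a, n)] := by
  induction l with
  | nil => simp at h
  | cons x t ih =>
    cases t with
    | nil => simp at h; simp [h, List.zip]
    | cons y r =>
      have h' : (y :: r).getLast? = some a := by
        simpa [List.getLast?_cons_cons] using h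
      have := ih h'
      simp only [List.cons_append, List.tail_cons, List.zip_cons_cons] at this ⊢
      rw [this]

lemma pv_adjBest_append (b n a : Int) (l : List Int) (h : l.getLast? = some a) :
    pvAdjBest b (l ++ [n]) = pvAdjBest b l ⊔ (n - a) := by
  unfold pvAdjBest
  rw [pv_zip_tail_append l a n h, List.foldl_append]
  simp [pv_step_eq_max]

lemma pv_adjBest_single (b n : Int) : pvAdjBest b [n] = b := rfl

lemma pv_occ_append (xs : List Int) (x v : Int) :
    pvOcc (xs ++ [x]) v = pvOcc xs v ++ (if x = v then [(xs.length : Int)] else []) := by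
  unfold pvOcc
  rw [PySem.List.enumerate_append, List.filter_append, List.map_append]
  by_cases hxv : x = v <;>
    simp [PySem.List.enumerate_cons, PySem.List.enumerate_nil, hxv]

lemma pv_gd_append (xs : List Int) (x : Int) :
    pvGd (xs ++ [x]) = (pvGd xs).modify x [] (fun l => l ++ [(xs.length : Int)]) := by
  unfold pvGd
  rw [PySem.List.enumerate_append, List.foldl_append]
  simp [PySem.List.enumerate_cons, PySem.List.enumerate_nil]

lemma pv_ga_append (xs : List Int) (x : Int) :
    pvGa (xs ++ [x]) = pvStepA (pvGa xs) ((xs.length : Int), x) := by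
  unfold pvGa
  rw [PySem.List.enumerate_append, List.foldl_append]
  simp [PySem.List.enumerate_cons, PySem.List.enumerate_nil]

lemma pv_gd_getD (xs : List Int) (v : Int) : (pvGd xs).getD v [] = pvOcc xs v := by
  induction xs using List.reverseRecOn with
  | nil => simp [pvGd, pvOcc, PySem.List.enumerate_nil, PySem.Dict.getD_empty]
  | append_singleton xs x ih =>
    rw [pv_gd_append, PySem.Dict.getD_modify, pv_occ_append]
    by_cases hvx : v = x
    · subst hvx; simp [ih]
    · have : ¬ x = v := fun h => hvx h.symm
      simp [hvx, this, ih]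

lemma pv_gd_nodup (xs : List Int) : (pvGd xs).keys.Nodup := by
  unfold pvGd
  exact PySem.Dict.nodup_keys_foldl_modify_key (PySem.List.enumerate xs 0)
    (fun (p : Int × Int) => p.2) [] (fun _ (p : Int × Int) => fun l => l ++ [p.1])
    PySem.Dict.empty (by simp [PySem.Dict.keys_empty])

lemma pv_gd_mem_keys (xs : List Int) (v : Int) :
    v ∈ (pvGd xs).keys ↔ pvOcc xs v ≠ [] := by
  induction xs using List.reverseRecOn with
  | nil => simp [pvGd, pvOcc, PySem.List.enumerate_nil, PySem.Dict.keys_empty]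
  | append_singleton xs x ih =>
    rw [pv_gd_append, PySem.Dict.keys_modify, pv_occ_append]
    rw [PySem.Dict.mem_keys_insert]
    by_cases hvx : v = x
    · subst hvx; simp
    · have : ¬ x = v := fun h => hvx h.symm
      simp [hvx, this, ih]

lemma pv_tot_keysfold (xs : List Int) :
    pvTot xs = (pvGd xs).keys.foldl (fun b k => pvAdjBest b (pvOcc xs k)) 0 := by
  unfold pvTot
  rw [PySem.Dict.values_eq_map_keys _ (pv_gd_nodup xs) [], List.foldl_map]
  exact PySem.List.foldl_congr_mem _ _ _ _ (fun b k _ => by rw [pv_gd_getD])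

lemma pv_foldl_adjBest_max (t : List Int) (H : Int → List Int) (c g : Int) :
    t.foldl (fun b k => pvAdjBest b (H k)) (c ⊔ g)
      = t.foldl (fun b k => pvAdjBest b (H k)) c ⊔ g := by
  induction t generalizing c with
  | nil => rfl
  | cons h t ih =>
    simp only [List.foldl_cons]
    rw [pv_adjBest_max, ih]

lemma pv_keyfold (x g : Int) (F G : Int → List Int)
    (hFx : ∀ b, pvAdjBest b (F x) = pvAdjBest b (G x) ⊔ g)
    (hFG : ∀ k, k ≠ x → F k = G k) :
    ∀ (K : List Int), K.Nodup → x ∈ K → ∀ b,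
      K.foldl (fun b k => pvAdjBest b (F k)) b
        = K.foldl (fun b k => pvAdjBest b (G k)) b ⊔ g := by
  intro K
  induction K with
  | nil => intro _ hx; exact absurd hx (List.not_mem_nil)
  | cons h t ih =>
    intro hnd hx b
    rcases List.nodup_cons.mp hnd with ⟨hht, hndt⟩
    simp only [List.foldl_cons]
    rcases List.mem_cons.mp hx with hxh | hxt
    · subst hxh
      rw [hFx b, pv_foldl_adjBest_max]
      congr 1
      exact PySem.List.foldl_congr_mem _ _ _ _
        (fun b k hk => by rw [hFG k (fun hkx => hht (hkx ▸ hk))])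
    · have hhx : h ≠ x := fun h' => hht (h' ▸ hxt)
      rw [hFG h hhx]
      exact ih hndt hxt _

lemma pv_main (xs : List Int) :
    (∀ v, (pvGa xs).1.get? v = (pvOcc xs v).getLast?) ∧ (pvGa xs).2 = pvTot xs := by
  induction xs using List.reverseRecOn with
  | nil =>
    constructor
    · intro v
      simp [pvGa, pvOcc, PySem.List.enumerate_nil, PySem.Dict.get?_empty]
    · rfl
  | append_singleton xs x ih =>
    obtain ⟨ihd, ihm⟩ := ih
    rw [pv_ga_append]
    set n : Int := (xs.length : Int) with hn
    by_cases hx : pvOcc xs x = []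
    · -- x has not occurred yet: both the dict key set and the max are extended trivially
      have hcon : (pvGa xs).1.contains x = false := by
        rw [PySem.Dict.contains_eq_isSome_get?, ihd x, hx]; rfl
      have hxk : x ∉ (pvGd xs).keys := by
        rw [pv_gd_mem_keys]; exact fun h => h hx
      have hgcon : (pvGd xs).contains x = false := by
        rcases h : (pvGd xs).contains x with _ | _
        · rfl
        · exact absurd (PySem.Dict.contains_iff_mem_keys _ _ |>.mp h) hxk
      constructor
      · intro v
        rw [show (pvStepA (pvGa xs) (n, x)).1 = (pvGa xs).1.insert x n from rfl]
        rw [PySem.Dict.get?_insert, pv_occ_append]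
        by_cases hvx : v = x
        · subst hvx; simp [hx, hn]
        · have : ¬ x = v := fun h => hvx h.symm
          simp [hvx, this, ihd v]
      · rw [show (pvStepA (pvGa xs) (n, x)).2 = (pvGa xs).2 by simp [pvStepA, hcon]]
        rw [ihm, pv_tot_keysfold, pv_tot_keysfold]
        rw [pv_gd_append, PySem.Dict.keys_modify,
          PySem.Dict.keys_insert_of_not_contains _ _ hgcon]
        rw [List.foldl_append]
        simp only [List.foldl_cons, List.foldl_nil]
        rw [show pvOcc (xs ++ [x]) x = [n] by simp [pv_occ_append, hx, hn]]
        rw [pv_adjBest_single]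
        exact (PySem.List.foldl_congr_mem _ _ _ _ (fun b k hk => by
          rw [pv_occ_append,
            if_neg (fun h : x = k => hxk (h ▸ hk)), List.append_nil])).symm
    · -- x occurred before: the new gap n - (last occurrence) enters both maxima
      obtain ⟨a, ha⟩ : ∃ a, (pvOcc xs x).getLast? = some a := by
        rcases h : (pvOcc xs x).getLast? with _ | a
        · exact absurd (List.getLast?_eq_none_iff.mp h) hx
        · exact ⟨a, rfl⟩
      have hcon : (pvGa xs).1.contains x = true := by
        rw [PySem.Dict.contains_eq_isSome_get?, ihd x, ha]; rfl
      have hxk : x ∈ (pvGd xs).keys := (pv_gd_mem_keys xs x).mpr hx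
      have hgcon : (pvGd xs).contains x = true :=
        (PySem.Dict.contains_iff_mem_keys _ _).mpr hxk
      have hgetD : (pvGa xs).1.getD x 0 = a := by
        rw [PySem.Dict.getD_eq_get?_getD, ihd x, ha]; rfl
      constructor
      · intro v
        rw [show (pvStepA (pvGa xs) (n, x)).1 = (pvGa xs).1.insert x n from rfl]
        rw [PySem.Dict.get?_insert, pv_occ_append]
        by_cases hvx : v = x
        · subst hvx; simp [hn]
        · have : ¬ x = v := fun h => hvx h.symm
          simp [hvx, this, ihd v]
      · rw [show (pvStepA (pvGa xs) (n, x)).2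
            = (if n - (pvGa xs).1.getD x 0 > (pvGa xs).2 then n - (pvGa xs).1.getD x 0
               else (pvGa xs).2) by simp [pvStepA, hcon]]
        rw [hgetD, pv_if_gt_eq_max, ihm]
        rw [pv_tot_keysfold, pv_tot_keysfold]
        rw [pv_gd_append, PySem.Dict.keys_modify,
          PySem.Dict.keys_insert_of_contains _ _ hgcon]
        exact (pv_keyfold x (n - a) (pvOcc (xs ++ [x])) (pvOcc xs)
          (fun b => by
            rw [show pvOcc (xs ++ [x]) x = pvOcc xs x ++ [n] by
                  simp [pv_occ_append, hn]]
            exact pv_adjBest_append b n a _ ha)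
          (fun k hkx => by
            rw [pv_occ_append, if_neg (fun h : x = k => hkx h.symm), List.append_nil])
          (pvGd xs).keys (pv_gd_nodup xs) hxk 0).symm

-- ===== VERDICT (by name: the statement is the Claim_ definition above) =====
theorem find_longest_gap_spec : Claim_equal_find_longest_gap := by
  intro array _
  unfold Spec_find_longest_gap
  rw [pv_ga_eq, pv_alt_eq]
  exact (pv_main array).2
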